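-- pv_equiv track=rewrite | github.com/philippegabriel/leetcode75 | leetcode1318.py | minFlips_slow
-- ===== SOURCE A (Python) =====
-- def minFlips_slow(a: int, b: int, c: int) -> int:
--     result = 0
--     aorb = a|b
--     bit_mask = aorb ^ c
--     while bit_mask:
--         if bit_mask & 1:
--             result += (1^(aorb & 1)) + (a&1) + (b&1)
--         bit_mask >>= 1
--         a >>= 1
--         b >>= 1
--         aorb = a | b
--     return result
-- ===== SOURCE B (Python) =====
-- def minFlips_slow(a: int, b: int, c: int) -> int:
--     # closed-form: bits to set (c has 1 where a|b has 0) cost 1 each;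
--     # bits to clear cost one per set bit of a and of b where c has 0
--     return (bin(c & ~(a | b)).count('1')
--             + bin(a & ~c).count('1')
--             + bin(b & ~c).count('1'))
-- ===== Notes on version B (the rewrite author's own statement) =====
-- stated objective: idiomatic
-- what changed: Replaces A's per-bit while-loop (shifting a, b and the mask one bit at a time) by a single closed-form expression: three whole-word masks (c & ~(a|b), a & ~c, b & ~c) whose popcounts are summed.
import Mathlib
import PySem

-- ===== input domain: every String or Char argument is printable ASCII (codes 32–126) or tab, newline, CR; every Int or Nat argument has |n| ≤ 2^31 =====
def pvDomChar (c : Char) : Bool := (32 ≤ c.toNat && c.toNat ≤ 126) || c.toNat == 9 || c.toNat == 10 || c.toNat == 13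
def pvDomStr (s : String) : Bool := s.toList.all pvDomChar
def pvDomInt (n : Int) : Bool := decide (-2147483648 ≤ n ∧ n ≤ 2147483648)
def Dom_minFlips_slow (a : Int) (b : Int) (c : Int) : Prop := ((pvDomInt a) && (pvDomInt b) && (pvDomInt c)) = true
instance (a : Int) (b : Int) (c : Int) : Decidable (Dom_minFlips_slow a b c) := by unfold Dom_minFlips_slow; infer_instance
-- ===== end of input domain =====

-- B replaces A's bit-by-bit while-loop with one closed-form sum of three mask popcounts (idiomatic rewrite, same results).


-- ===== PORT A =====
-- Python's `&` `|` `^` are PySem.Int.band / bor / bxor (Python-exact two's complement);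
-- `x >> 1` is core Int.shiftRight by 1 (arithmetic shift, floors, also on negatives; exact).
-- The `bit_mask < 0` branch is a totality guard only: there the Python loop never terminates
-- (an arithmetic right shift of a negative number is never 0), so such inputs lie outside Pre_.
theorem int_shiftRight_one_eq_div2 (x : Int) : x >>> (1:Nat) = x.div2 := by
  cases x with
  | ofNat n =>
    show Int.ofNat (n >>> 1) = Int.ofNat n.div2
    rw [Nat.shiftRight_succ, Nat.shiftRight_zero, Nat.div2_val]
  | negSucc n =>
    show Int.negSucc (n >>> 1) = Int.negSucc n.div2
    rw [Nat.shiftRight_succ, Nat.shiftRight_zero, Nat.div2_val]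

def minFlipsLoopA (res : Int) (bit_mask : Int) (a : Int) (b : Int) : Int :=
  if bit_mask = 0 then res
  else if bit_mask < 0 then res
  else
    minFlipsLoopA
      (if PySem.Int.band bit_mask 1 ≠ 0
         then res + (PySem.Int.bxor 1 (PySem.Int.band (PySem.Int.bor a b) 1)
                      + PySem.Int.band a 1 + PySem.Int.band b 1)
         else res)
      (bit_mask >>> (1:Nat)) (a >>> (1:Nat)) (b >>> (1:Nat))
termination_by bit_mask.natAbs
decreasing_by
  rw [int_shiftRight_one_eq_div2, Int.div2_val]; omega

def minFlips_slow (a : Int) (b : Int) (c : Int) : Int :=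
  minFlipsLoopA 0 (PySem.Int.bxor (PySem.Int.bor a b) c) a b

-- ===== PORT B =====
-- `bin(x).count('1')` counts the binary digits 1 of |x| (Python prints the magnitude after a
-- sign), i.e. x.bit_count() = PySem.Int.bitCount (Python-exact on negatives).
def bitCountB (x : Int) : Int :=
  (PySem.Int.bitCount x : Int)

def minFlips_slow_alt (a : Int) (b : Int) (c : Int) : Int :=
  bitCountB (PySem.Int.band c (Int.not (PySem.Int.bor a b)))
    + bitCountB (PySem.Int.band a (Int.not c))
    + bitCountB (PySem.Int.band b (Int.not c))

-- ===== PRECONDITION & SPEC =====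
-- Pre_ excludes exactly the inputs on which Python A never returns: when (a|b)^c is negative the
-- while-loop's mask is shifted arithmetically forever without reaching 0 (an infinite loop).
def Pre_minFlips_slow (a : Int) (b : Int) (c : Int) : Prop := 0 ≤ PySem.Int.bxor (PySem.Int.bor a b) c
instance (a : Int) (b : Int) (c : Int) : Decidable (Pre_minFlips_slow a b c) := by unfold Pre_minFlips_slow; infer_instance
def pvWitness_minFlips_slow : Int × Int × Int := (2, 6, 5)

def Spec_minFlips_slow (a : Int) (b : Int) (c : Int) (out : Int) : Prop := out = minFlips_slow_alt a b c
instance (a : Int) (b : Int) (c : Int) (out : Int) : Decidable (Spec_minFlips_slow a b c out) := by unfold Spec_minFlips_slow; infer_instance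

-- ===== CLAIM (what is proved, stated in full; the proofs are below) =====
def Claim_equal_minFlips_slow : Prop := ∀ (a : Int) (b : Int) (c : Int), Dom_minFlips_slow a b c → Pre_minFlips_slow a b c → Spec_minFlips_slow a b c (minFlips_slow a b c)

-- ===== LEMMAS AND PROOFS =====

theorem Int_land_zero_right (x : Int) : Int.land x 0 = 0 := by
  cases x with
  | ofNat n => show ((n &&& 0 : Nat) : Int) = 0; simp
  | negSucc n => show ((Nat.ldiff 0 n : Nat) : Int) = 0; simp [Nat.ldiff, Nat.bitwise_zero_left]

theorem Int_land_zero_left (x : Int) : Int.land 0 x = 0 := by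
  cases x with
  | ofNat n => show ((0 &&& n : Nat) : Int) = 0; simp
  | negSucc n => show ((Nat.ldiff 0 n : Nat) : Int) = 0; simp [Nat.ldiff, Nat.bitwise_zero_left]

theorem Int_land_nonneg_left (x y : Int) (h : 0 ≤ x) : 0 ≤ Int.land x y := by
  cases x with
  | ofNat m =>
    cases y with
    | ofNat n => exact Int.natCast_nonneg _
    | negSucc n => exact Int.natCast_nonneg _
  | negSucc m => exact absurd h (by omega)

theorem Int_div2_nonneg (x : Int) (h : 0 ≤ x) : 0 ≤ x.div2 := by
  rw [Int.div2_val]; omega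

theorem Int_land_one (x : Int) : Int.land x 1 = cond x.bodd 1 0 := by
  have h1 : (1 : Int) = Int.bit true 0 := by simp [Int.bit]
  calc Int.land x 1 = Int.land (Int.bit x.bodd x.div2) (Int.bit true 0) := by
        rw [Int.bit_decomp, ← h1]
    _ = Int.bit (x.bodd && true) (Int.land x.div2 0) := Int.land_bit _ _ _ _
    _ = cond x.bodd 1 0 := by
        rw [Int_land_zero_right, Bool.and_true, Int.bit_val]
        cases x.bodd <;> simp

-- testBit-extensionality for Int (the two's-complement bits determine the integer)
theorem Int_eq_of_testBit_eq (x y : Int) (h : ∀ k, x.testBit k = y.testBit k) : x = y := by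
  cases x with
  | ofNat m =>
    cases y with
    | ofNat n =>
      have : m = n := Nat.eq_of_testBit_eq (fun k => h k)
      rw [this]
    | negSucc n =>
      exfalso
      have hk := h (m + n)
      have hm : m.testBit (m + n) = false :=
        Nat.testBit_eq_false_of_lt (lt_of_lt_of_le (Nat.lt_two_pow_self) (Nat.pow_le_pow_right (by norm_num) (by omega)))
      have hn : n.testBit (m + n) = false :=
        Nat.testBit_eq_false_of_lt (lt_of_lt_of_le (Nat.lt_two_pow_self) (Nat.pow_le_pow_right (by norm_num) (by omega)))
      simp [Int.testBit, hm, hn] at hk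
  | negSucc m =>
    cases y with
    | ofNat n =>
      exfalso
      have hk := h (m + n)
      have hm : m.testBit (m + n) = false :=
        Nat.testBit_eq_false_of_lt (lt_of_lt_of_le (Nat.lt_two_pow_self) (Nat.pow_le_pow_right (by norm_num) (by omega)))
      have hn : n.testBit (m + n) = false :=
        Nat.testBit_eq_false_of_lt (lt_of_lt_of_le (Nat.lt_two_pow_self) (Nat.pow_le_pow_right (by norm_num) (by omega)))
      simp [Int.testBit, hm, hn] at hk
    | negSucc n =>
      have : m = n := Nat.eq_of_testBit_eq (fun k => by
        have hk := h k
        simp [Int.testBit] at hk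
        exact hk)
      rw [this]

-- the three whole-word mask identities B relies on
theorem mask_and_a (a b c : Int) :
    Int.land (Int.xor (Int.lor a b) c) a = Int.land a (Int.lnot c) := by
  apply Int_eq_of_testBit_eq
  intro k
  simp only [Int.testBit_land, Int.testBit_lxor, Int.testBit_lor, Int.testBit_lnot]
  cases a.testBit k <;> cases b.testBit k <;> cases c.testBit k <;> rfl

theorem mask_and_b (a b c : Int) :
    Int.land (Int.xor (Int.lor a b) c) b = Int.land b (Int.lnot c) := by
  apply Int_eq_of_testBit_eq
  intro k
  simp only [Int.testBit_land, Int.testBit_lxor, Int.testBit_lor, Int.testBit_lnot]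
  cases a.testBit k <;> cases b.testBit k <;> cases c.testBit k <;> rfl

theorem mask_and_notor (a b c : Int) :
    Int.land (Int.xor (Int.lor a b) c) (Int.lnot (Int.lor a b)) =
      Int.land c (Int.lnot (Int.lor a b)) := by
  apply Int_eq_of_testBit_eq
  intro k
  simp only [Int.testBit_land, Int.testBit_lxor, Int.testBit_lor, Int.testBit_lnot]
  cases a.testBit k <;> cases b.testBit k <;> cases c.testBit k <;> rfl

theorem nat_and_add_ldiff (m n : Nat) : (m &&& n) + Nat.ldiff m n = m := by
  induction m using Nat.binaryRec generalizing n with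
  | zero => simp [Nat.ldiff, Nat.bitwise_zero_left]
  | bit b m ih =>
    rw [← Nat.bit_testBit_zero_shiftRight_one n, Nat.land_bit, Nat.ldiff_bit]
    have h := ih (n >>> 1)
    cases b <;> cases n.testBit 0 <;> simp [Nat.bit_val] <;> omega

-- bridges: the PySem Python-exact operators compute Mathlib's two's-complement operations
theorem band_eq_land (x y : Int) : PySem.Int.band x y = Int.land x y := by
  unfold PySem.Int.band
  cases x with
  | ofNat m =>
    cases y with
    | ofNat n =>
      rw [if_pos (by exact Int.natCast_nonneg m), if_pos (by exact Int.natCast_nonneg n)]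
      simp only [Int.land, Int.ofNat_eq_natCast, Int.toNat_natCast]
    | negSucc n =>
      rw [if_pos (by exact Int.natCast_nonneg m), if_neg (by omega)]
      have h1 : (-(Int.negSucc n) - 1) = (n : Int) := by omega
      rw [h1]
      have h := nat_and_add_ldiff m n
      simp only [Int.land, Int.ofNat_eq_natCast, Int.toNat_natCast]
      omega
  | negSucc m =>
    cases y with
    | ofNat n =>
      rw [if_neg (by omega), if_pos (by exact Int.natCast_nonneg n)]
      have h1 : (-(Int.negSucc m) - 1) = (m : Int) := by omega
      rw [h1]
      have h := nat_and_add_ldiff n m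
      simp only [Int.land, Int.ofNat_eq_natCast, Int.toNat_natCast]
      omega
    | negSucc n =>
      rw [if_neg (by omega), if_neg (by omega)]
      have h1 : (-(Int.negSucc m) - 1) = (m : Int) := by omega
      have h2 : (-(Int.negSucc n) - 1) = (n : Int) := by omega
      rw [h1, h2]
      simp only [Int.land, Int.toNat_natCast]
      omega

theorem bor_eq_lor (x y : Int) : PySem.Int.bor x y = Int.lor x y := by
  unfold PySem.Int.bor
  cases x with
  | ofNat m =>
    cases y with
    | ofNat n =>
      rw [if_pos (by exact Int.natCast_nonneg m), if_pos (by exact Int.natCast_nonneg n)]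
      simp only [Int.lor, Int.ofNat_eq_natCast, Int.toNat_natCast]
    | negSucc n =>
      rw [if_pos (by exact Int.natCast_nonneg m), if_neg (by omega)]
      have h1 : (-(Int.negSucc n) - 1) = (n : Int) := by omega
      rw [h1]
      have h := nat_and_add_ldiff n m
      simp only [Int.lor, Int.ofNat_eq_natCast, Int.toNat_natCast]
      omega
  | negSucc m =>
    cases y with
    | ofNat n =>
      rw [if_neg (by omega), if_pos (by exact Int.natCast_nonneg n)]
      have h1 : (-(Int.negSucc m) - 1) = (m : Int) := by omega
      rw [h1]
      have h := nat_and_add_ldiff m n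
      simp only [Int.lor, Int.ofNat_eq_natCast, Int.toNat_natCast]
      omega
    | negSucc n =>
      rw [if_neg (by omega), if_neg (by omega)]
      have h1 : (-(Int.negSucc m) - 1) = (m : Int) := by omega
      have h2 : (-(Int.negSucc n) - 1) = (n : Int) := by omega
      rw [h1, h2]
      simp only [Int.lor, Int.toNat_natCast]
      omega

theorem bxor_eq_xor (x y : Int) : PySem.Int.bxor x y = Int.xor x y := by
  unfold PySem.Int.bxor
  cases x with
  | ofNat m =>
    cases y with
    | ofNat n =>
      rw [if_pos (by exact Int.natCast_nonneg m), if_pos (by exact Int.natCast_nonneg n)]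
      simp only [Int.xor, Int.ofNat_eq_natCast, Int.toNat_natCast]
    | negSucc n =>
      rw [if_pos (by exact Int.natCast_nonneg m), if_neg (by omega)]
      have h1 : (-(Int.negSucc n) - 1) = (n : Int) := by omega
      rw [h1]
      simp only [Int.xor, Int.ofNat_eq_natCast, Int.toNat_natCast]
      omega
  | negSucc m =>
    cases y with
    | ofNat n =>
      rw [if_neg (by omega), if_pos (by exact Int.natCast_nonneg n)]
      have h1 : (-(Int.negSucc m) - 1) = (m : Int) := by omega
      rw [h1]
      simp only [Int.xor, Int.ofNat_eq_natCast, Int.toNat_natCast]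
      omega
    | negSucc n =>
      rw [if_neg (by omega), if_neg (by omega)]
      have h1 : (-(Int.negSucc m) - 1) = (m : Int) := by omega
      have h2 : (-(Int.negSucc n) - 1) = (n : Int) := by omega
      rw [h1, h2]
      simp only [Int.xor, Int.toNat_natCast]

theorem not_eq_lnot (x : Int) : Int.not x = Int.lnot x := by
  cases x <;> rfl

theorem bitCountB_zero : bitCountB 0 = 0 := by
  unfold bitCountB
  rw [PySem.Int.bitCount_zero]
  rfl

theorem bitCountB_bit (b : Bool) (n : Int) (h : 0 ≤ n) :
    bitCountB (Int.bit b n) = cond b 1 0 + bitCountB n := by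
  obtain ⟨m, rfl⟩ := Int.eq_ofNat_of_zero_le h
  unfold bitCountB
  rw [Int.bit_coe_nat]
  by_cases hm0 : Nat.bit b m = 0
  · cases b with
    | false =>
      simp only [Nat.bit_val, Bool.toNat_false, Nat.mul_comm] at hm0
      have hm : m = 0 := by omega
      subst hm
      simp [Nat.bit, PySem.Int.bitCount_zero]
    | true =>
      exfalso
      simp [Nat.bit_val] at hm0
  · rw [PySem.Int.bitCount_natCast (Nat.pos_of_ne_zero hm0)]
    have h1 : (Nat.bit b m) % 2 = Bool.toNat b := by
      cases b <;> simp [Nat.bit_val]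
    have h2 : (Nat.bit b m) / 2 = m := by
      cases b <;> simp [Nat.bit_val]; omega
    rw [h1, h2]
    cases b <;> simp

-- loop invariant: the loop adds the popcounts of the three masks built from its arguments
theorem minFlipsLoopA_spec (n : Nat) :
    ∀ (m a b res : Int), 0 ≤ m → m.natAbs = n →
      minFlipsLoopA res m a b =
        res + bitCountB (Int.land m (Int.lnot (Int.lor a b)))
            + bitCountB (Int.land m a) + bitCountB (Int.land m b) := by
  induction n using Nat.strong_induction_on with
  | _ n ih =>
    intro m a b res hm hn
    by_cases h0 : m = 0
    · subst h0
      rw [minFlipsLoopA]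
      simp [Int_land_zero_left, bitCountB_zero]
    · have hmpos : 0 < m := lt_of_le_of_ne hm (Ne.symm h0)
      have hmd : (0:Int) ≤ m.div2 := Int_div2_nonneg m hm
      have hdec : m.div2.natAbs < n := by
        rw [← hn, Int.div2_val]; omega
      rw [minFlipsLoopA, if_neg h0, if_neg (by omega)]
      simp only [band_eq_land, bor_eq_lor, bxor_eq_xor, int_shiftRight_one_eq_div2]
      rw [ih m.div2.natAbs hdec m.div2 a.div2 b.div2 _ hmd rfl]
      have Hm := Int.bit_decomp m
      have Ha := Int.bit_decomp a
      have Hb := Int.bit_decomp b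
      have hlor : Int.lor a b = Int.bit (a.bodd || b.bodd) (Int.lor a.div2 b.div2) := by
        conv_lhs => rw [← Ha, ← Hb]
        exact Int.lor_bit _ _ _ _
      have hlnot : Int.lnot (Int.lor a b)
          = Int.bit (!(a.bodd || b.bodd)) (Int.lnot (Int.lor a.div2 b.div2)) := by
        rw [hlor]; exact Int.lnot_bit _ _
      have hmask1 : Int.land m (Int.lnot (Int.lor a b))
          = Int.bit (m.bodd && !(a.bodd || b.bodd))
              (Int.land m.div2 (Int.lnot (Int.lor a.div2 b.div2))) := by
        conv_lhs => rw [← Hm, hlnot]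
        exact Int.land_bit _ _ _ _
      have hmask2 : Int.land m a = Int.bit (m.bodd && a.bodd) (Int.land m.div2 a.div2) := by
        conv_lhs => rw [← Hm]; rw [← Ha]
        exact Int.land_bit _ _ _ _
      have hmask3 : Int.land m b = Int.bit (m.bodd && b.bodd) (Int.land m.div2 b.div2) := by
        conv_lhs => rw [← Hm]; rw [← Hb]
        exact Int.land_bit _ _ _ _
      rw [hmask1, hmask2, hmask3,
        bitCountB_bit _ _ (Int_land_nonneg_left _ _ hmd),
        bitCountB_bit _ _ (Int_land_nonneg_left _ _ hmd),
        bitCountB_bit _ _ (Int_land_nonneg_left _ _ hmd),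
        hlor]
      simp only [Int_land_one, Int.bodd_bit]
      cases hmb : m.bodd <;> cases hab : a.bodd <;> cases hbb : b.bodd <;>
        simp [Int.xor] <;> ring

-- ===== VERDICT (by name: the statement is the Claim_ definition above) =====
theorem minFlips_slow_spec : Claim_equal_minFlips_slow := by
  intro a b c _hdom hpre
  unfold Pre_minFlips_slow at hpre
  rw [bxor_eq_xor, bor_eq_lor] at hpre
  unfold Spec_minFlips_slow minFlips_slow minFlips_slow_alt
  simp only [band_eq_land, bor_eq_lor, bxor_eq_xor, not_eq_lnot]
  rw [minFlipsLoopA_spec (Int.xor (Int.lor a b) c).natAbs _ a b 0 hpre rfl,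
    mask_and_a, mask_and_b, mask_and_notor]
  ring
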